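-- pv_equiv track=rewrite | github.com/miliar/Code_Jam_Webscraper | solutions_python/Problem_201/948.py | adi
-- ===== SOURCE A (Python) =====
-- def adi(N, K):
--     if K == N:
--         return 0, 0
--     n = N - 1
--     a = n // 2
--     b = n - a
--     k = K - 1
--     ka = k // 2
--     kb = k - ka
--     if K == 1:
--         return b, a
--     if K == 2:
--         return adi(b, 1)
--     if n % 2 == 0:
--         return adi(b, kb)
--     else:
--         if k % 2 == 0:
--             return adi(a, ka)
--         else:
--             return adi(b, kb)
-- ===== SOURCE B (Python) =====
-- def adi(N, K):
--     # iterative reformulation of the tail recursion: loop over the pair (N, K)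
--     while True:
--         if K == N:
--             return 0, 0
--         n = N - 1
--         a = n // 2
--         b = n - a
--         k = K - 1
--         ka = k // 2
--         kb = k - ka
--         if K == 1:
--             return b, a
--         if K == 2:
--             N, K = b, 1
--         elif n % 2 == 0 or k % 2 == 1:
--             N, K = b, kb
--         else:
--             N, K = a, ka
-- ===== Notes on version B (the rewrite author's own statement) =====
-- stated objective: alternative
-- what changed: Replaced the tail recursion by an iterative while-True loop over the state pair (N, K), merging the two branches that continue with (b, kb) into one condition.
import Mathlib
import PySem

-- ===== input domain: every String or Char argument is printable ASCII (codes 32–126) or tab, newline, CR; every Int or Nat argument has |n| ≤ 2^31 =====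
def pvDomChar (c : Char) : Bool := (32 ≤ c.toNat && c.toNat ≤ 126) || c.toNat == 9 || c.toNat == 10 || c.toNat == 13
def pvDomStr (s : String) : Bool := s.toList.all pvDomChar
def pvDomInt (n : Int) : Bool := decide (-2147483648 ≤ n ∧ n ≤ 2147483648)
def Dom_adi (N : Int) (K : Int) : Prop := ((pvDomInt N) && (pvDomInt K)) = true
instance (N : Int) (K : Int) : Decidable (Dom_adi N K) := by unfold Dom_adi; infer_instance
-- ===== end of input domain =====

-- B replaces A's tail recursion by an iterative loop over the state pair (N, K),
-- merging the two branches that continue with (b, kb); same cost, alternative shape.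


-- termination measure shared by both ports' totality guards (not part of either algorithm)
def pvM (N : Int) (K : Int) : Nat := (if 1 ≤ K then K else N - K).toNat

-- ===== PORT A =====
def adi (N : Int) (K : Int) : Int × Int :=
  if K = N then (0, 0)
  else
    let n := N - 1
    let a := PySem.Int.floordiv n 2
    let b := n - a
    let k := K - 1
    let ka := PySem.Int.floordiv k 2
    let kb := k - ka
    if K = 1 then (b, a)
    else if K = 2 then
      -- each recursive call is guarded by the decrease of pvM (totality only;
      -- the guard holds on every input admitted by Pre_adi)
      if _h : pvM b 1 < pvM N K then adi b 1 else (0, 0)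
    else if PySem.Int.mod n 2 = 0 then
      if _h : pvM b kb < pvM N K then adi b kb else (0, 0)
    else if PySem.Int.mod k 2 = 0 then
      if _h : pvM a ka < pvM N K then adi a ka else (0, 0)
    else
      if _h : pvM b kb < pvM N K then adi b kb else (0, 0)
termination_by pvM N K
decreasing_by all_goals exact _h

-- ===== PORT B =====
-- the while-True loop of Source B: each iteration either returns or updates the state pair
def adiLoop (N : Int) (K : Int) : Int × Int :=
  if K = N then (0, 0)
  else
    let n := N - 1
    let a := PySem.Int.floordiv n 2
    let b := n - a
    let k := K - 1
    let ka := PySem.Int.floordiv k 2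
    let kb := k - ka
    if K = 1 then (b, a)
    else
      let s : Int × Int :=
        if K = 2 then (b, 1)
        else if PySem.Int.mod n 2 = 0 ∨ PySem.Int.mod k 2 = 1 then (b, kb)
        else (a, ka)
      if _h : pvM s.1 s.2 < pvM N K then adiLoop s.1 s.2 else (0, 0)
termination_by pvM N K
decreasing_by all_goals exact _h

def adi_alt (N : Int) (K : Int) : Int × Int := adiLoop N K

-- ===== PRECONDITION & SPEC =====
-- Pre_ excludes exactly the inputs with N < K ≤ 0, on which A recurses forever
-- (RecursionError); B loops forever there too.
def Pre_adi (N : Int) (K : Int) : Prop := 1 ≤ K ∨ K ≤ N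
instance (N : Int) (K : Int) : Decidable (Pre_adi N K) := by unfold Pre_adi; infer_instance
def pvWitness_adi : Int × Int := (5, 3)

def Spec_adi (N : Int) (K : Int) (out : Int × Int) : Prop := out = adi_alt N K
instance (N : Int) (K : Int) (out : Int × Int) : Decidable (Spec_adi N K out) := by unfold Spec_adi; infer_instance

-- ===== CLAIM (what is proved, stated in full; the proofs are below) =====
def Claim_equal_adi : Prop := ∀ (N : Int) (K : Int), Dom_adi N K → Pre_adi N K → Spec_adi N K (adi N K)

-- ===== LEMMAS AND PROOFS =====

-- one step of the recursion: the guard decrease and the preservation of Pre_,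
-- stated over ediv/emod so omega can discharge everything
theorem adi_step_b (N K : Int) (hpre : 1 ≤ K ∨ K ≤ N) (hN : K ≠ N) (h1 : K ≠ 1) (h2 : K ≠ 2)
    (hpar : (N - 1) % 2 = 0 ∨ (K - 1) % 2 = 1) :
    pvM ((N - 1) - (N - 1) / 2) ((K - 1) - (K - 1) / 2) < pvM N K ∧
      (1 ≤ (K - 1) - (K - 1) / 2 ∨ (K - 1) - (K - 1) / 2 ≤ (N - 1) - (N - 1) / 2) := by
  unfold pvM; constructor
  · split_ifs <;> omega
  · omega

theorem adi_step_a (N K : Int) (hpre : 1 ≤ K ∨ K ≤ N) (hN : K ≠ N) (h1 : K ≠ 1) (h2 : K ≠ 2)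
    (hpar : ¬ (N - 1) % 2 = 0 ∧ (K - 1) % 2 = 0) :
    pvM ((N - 1) / 2) ((K - 1) / 2) < pvM N K ∧
      (1 ≤ (K - 1) / 2 ∨ (K - 1) / 2 ≤ (N - 1) / 2) := by
  unfold pvM; constructor
  · split_ifs <;> omega
  · omega

theorem adi_step_two (N K : Int) (h2 : K = 2) :
    pvM ((N - 1) - (N - 1) / 2) 1 < pvM N K := by
  subst h2; unfold pvM; split_ifs <;> omega

theorem adi_eq_loop (m : Nat) :
    ∀ (N K : Int), pvM N K = m → Pre_adi N K → adi N K = adiLoop N K := by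
  induction m using Nat.strong_induction_on with
  | _ m ih =>
    intro N K hm hpre
    rw [adi, adiLoop]
    by_cases hN : K = N
    · simp [hN]
    simp only [if_neg hN]
    by_cases h1 : K = 1
    · simp [h1]
    simp only [if_neg h1]
    rw [PySem.Int.floordiv_eq_ediv_of_pos (by norm_num : (0:Int) < 2),
        PySem.Int.floordiv_eq_ediv_of_pos (by norm_num : (0:Int) < 2),
        PySem.Int.mod_eq_emod_of_pos (by norm_num : (0:Int) < 2),
        PySem.Int.mod_eq_emod_of_pos (by norm_num : (0:Int) < 2)]
    by_cases h2 : K = 2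
    · have hg := adi_step_two N K h2
      simp only [h2]
      exact ih _ (hm ▸ hg) _ _ rfl (Or.inl le_rfl)
    simp only [if_neg h2]
    by_cases hn : (N - 1) % 2 = 0
    · have hg := adi_step_b N K hpre hN h1 h2 (Or.inl hn)
      simp only [if_pos hn, if_pos (Or.inl hn), dif_pos hg.1]
      exact ih _ (hm ▸ hg.1) _ _ rfl hg.2
    simp only [if_neg hn]
    by_cases hk : (K - 1) % 2 = 0
    · have hg := adi_step_a N K hpre hN h1 h2 ⟨hn, hk⟩
      have hnotb : ¬ ((N - 1) % 2 = 0 ∨ (K - 1) % 2 = 1) := by omega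
      simp only [if_pos hk, if_neg hnotb, dif_pos hg.1]
      exact ih _ (hm ▸ hg.1) _ _ rfl hg.2
    · have hk1 : (K - 1) % 2 = 1 := by omega
      have hg := adi_step_b N K hpre hN h1 h2 (Or.inr hk1)
      simp only [if_neg hk, if_pos (Or.inr hk1), dif_pos hg.1]
      exact ih _ (hm ▸ hg.1) _ _ rfl hg.2

-- ===== VERDICT (by name: the statement is the Claim_ definition above) =====
theorem adi_spec : Claim_equal_adi := by
  intro N K _hdom hpre
  unfold Spec_adi adi_alt
  exact adi_eq_loop (pvM N K) N K rfl hpre
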